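/- GENERATED by farm/mkstatement.py from design/units.tsv (unit `start_decoder.C3a`) and the assertions of Vorbis/Spec/StartDecoderC3.lean — do not edit.
   THE STATEMENT of the proof unit `start_decoder.C3a`: segment C3a of `start_decoder` (6 instructions; entries 0x1144ee;
   exits 0x114536; ranges 0x1144ee-0x114505)
   takes each of its entry assertions to one of its exit assertions (`Vorbis.Spec.StartDecoder.SegC3a`), given the contracts of its callees.
   What the names mean: Vorbis/Spec/Basic.lean (the shared hypotheses), Vorbis/Spec/StartDecoderC3.lean (the assertions). The theorem to prove:
   `theorem start_decoder_C3a_ok : Vorbis.Spec.start_decoder_C3a.Statement`. -/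
import Vorbis.Spec.Reader
import Vorbis.Spec.StartDecoderC3
namespace Vorbis.Spec.start_decoder_C3a
open X86 X86.User Asan

/-- The statement of unit `start_decoder.C3a`. -/
def Statement : Prop :=
  ∀ (Lay : Layout) (_hLay : Lay.hi = 0x1000000) (μ : Microarch) (_hμ : UserX.MicroOK μ) (u₀ : State)
    (_hcode : HasCodeNat Lay u₀ Vorbis.L.start_decoder.entry Vorbis.Code.code_start_decoder.nat Vorbis.L.start_decoder.size)
    (_h_get_bits : ∀ (others : List Obj) (frames : List (Nat × FrameLayout)) (Blk : Block → Prop) (len : Nat), Calls Lay μ Vorbis.WayInv (Vorbis.conv u₀) Vorbis.L.get_bits.entry (Vorbis.Spec.get_bits.spec others frames Blk len)),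
    Vorbis.Spec.StartDecoder.SegC3a Lay μ u₀

end Vorbis.Spec.start_decoder_C3a
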